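-- pv_equiv track=rewrite | github.com/Ka-raS/School-Code | Nam 2 Ky 2 - Lap trinh Python/207. SẮP XẾP DÃY SỐ.py | insert_before
-- ===== SOURCE A (Python) =====
-- from typing import List
--
-- def insert_before(numbers: List[int], insert_value: int, target_value: int) -> List[int]:
--     negatives: List[int] = []
--     positives: List[int] = []
--
--     def insert(value: int) -> None:
--         if value < 0:
--             negatives.append(value)
--         else:
--             positives.append(value)
--
--     for number in numbers:
--         if number == target_value:
--             insert(insert_value)
--         insert(number)
--
--     result = negatives
--     result.extend(positives)
--     return result
-- ===== SOURCE B (Python) =====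
-- from typing import List
--
-- def insert_before(numbers: List[int], insert_value: int, target_value: int) -> List[int]:
--     # build the expanded sequence first, then partition by sign in two filter passes
--     expanded: List[int] = []
--     for number in numbers:
--         if number == target_value:
--             expanded.append(insert_value)
--         expanded.append(number)
--     return [x for x in expanded if x < 0] + [x for x in expanded if x >= 0]
-- ===== Notes on version B (the rewrite author's own statement) =====
-- stated objective: simpler
-- what changed: B first builds the expanded list (insert_value before each target occurrence) in one loop, then partitions it with two separate sign filters and concatenates, instead of A's single fused pass maintaining two accumulators via a nested helper.
import Mathlib
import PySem

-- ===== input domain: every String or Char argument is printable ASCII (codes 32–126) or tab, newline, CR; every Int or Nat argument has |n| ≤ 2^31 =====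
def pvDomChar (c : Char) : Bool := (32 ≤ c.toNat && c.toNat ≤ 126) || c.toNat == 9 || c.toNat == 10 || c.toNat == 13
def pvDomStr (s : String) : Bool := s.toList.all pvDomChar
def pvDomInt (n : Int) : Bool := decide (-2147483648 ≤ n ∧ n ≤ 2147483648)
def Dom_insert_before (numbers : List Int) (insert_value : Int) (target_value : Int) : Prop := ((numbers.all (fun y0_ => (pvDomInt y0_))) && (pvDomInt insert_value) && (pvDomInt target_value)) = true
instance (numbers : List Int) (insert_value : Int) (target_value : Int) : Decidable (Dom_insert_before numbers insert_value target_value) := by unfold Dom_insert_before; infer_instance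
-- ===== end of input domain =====

-- B builds the expanded list first, then partitions it with two sign filters; A fuses both into one pass with two accumulators (objective: simpler).

-- ===== PORT A =====
-- 'insert' helper: appends value to negatives or positives
def insertAHelper (state : List Int × List Int) (value : Int) : List Int × List Int :=
  if value < 0 then (state.1 ++ [value], state.2) else (state.1, state.2 ++ [value])

def insert_before (numbers : List Int) (insert_value : Int) (target_value : Int) : List Int :=
  let final := numbers.foldl (fun state number =>
    let state := if number == target_value then insertAHelper state insert_value else state
    insertAHelper state number) ([], [])
  final.1 ++ final.2

-- ===== PORT B =====
def insert_before_alt (numbers : List Int) (insert_value : Int) (target_value : Int) : List Int :=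
  let expanded := numbers.foldl (fun acc number =>
    (if number == target_value then acc ++ [insert_value] else acc) ++ [number]) []
  expanded.filter (fun x => x < 0) ++ expanded.filter (fun x => x ≥ 0)

-- ===== PRECONDITION & SPEC =====
def Spec_insert_before (numbers : List Int) (insert_value : Int) (target_value : Int) (out : List Int) : Prop := out = insert_before_alt numbers insert_value target_value
instance (numbers : List Int) (insert_value : Int) (target_value : Int) (out : List Int) : Decidable (Spec_insert_before numbers insert_value target_value out) := by unfold Spec_insert_before; infer_instance

-- ===== CLAIM (what is proved, stated in full; the proofs are below) =====
def Claim_equal_insert_before : Prop := ∀ (numbers : List Int) (insert_value : Int) (target_value : Int), Dom_insert_before numbers insert_value target_value → Spec_insert_before numbers insert_value target_value (insert_before numbers insert_value target_value)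

-- ===== LEMMAS AND PROOFS =====

-- one step of A's state equals appending one expansion chunk's filters
theorem insertAHelper_filter (neg pos : List Int) (v : Int) :
    insertAHelper (neg, pos) v =
      (neg ++ [v].filter (fun x => x < 0), pos ++ [v].filter (fun x => x ≥ 0)) := by
  by_cases h : v < 0
  · simp [insertAHelper, h, not_le.mpr h]
  · simp [insertAHelper, h, not_lt.mp h]

-- B's expansion fold factors through its accumulator
theorem foldl_expand_append (insert_value target_value : Int) (l : List Int) :
    ∀ acc : List Int, l.foldl (fun acc number =>
        (if number == target_value then acc ++ [insert_value] else acc) ++ [number]) acc =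
      acc ++ l.foldl (fun acc number =>
        (if number == target_value then acc ++ [insert_value] else acc) ++ [number]) [] := by
  induction l with
  | nil => simp
  | cons m t iht =>
    intro acc
    simp only [List.foldl_cons]
    rw [iht, iht ((if (m == target_value) = true then [] ++ [insert_value] else []) ++ [m])]
    by_cases hm : m == target_value <;> simp [hm]

-- invariant: A's fold from state (neg, pos) equals (neg, pos) extended by the filters of B's expansion
theorem fold_invariant (numbers : List Int) (insert_value target_value : Int)
    (neg pos : List Int) :
    numbers.foldl (fun state number =>
      let state := if number == target_value then insertAHelper state insert_value else state
      insertAHelper state number) (neg, pos) =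
    (neg ++ (numbers.foldl (fun acc number =>
        (if number == target_value then acc ++ [insert_value] else acc) ++ [number]) []).filter (fun x => x < 0),
     pos ++ (numbers.foldl (fun acc number =>
        (if number == target_value then acc ++ [insert_value] else acc) ++ [number]) []).filter (fun x => x ≥ 0)) := by
  induction numbers generalizing neg pos with
  | nil => simp
  | cons n rest ih =>
    simp only [List.foldl_cons]
    by_cases h : n == target_value
    · simp only [if_pos h]
      rw [insertAHelper_filter, insertAHelper_filter, ih,
        foldl_expand_append insert_value target_value rest ([] ++ [insert_value] ++ [n])]
      simp [List.filter_cons] <;> split_ifs <;> simp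
    · simp only [if_neg h]
      rw [insertAHelper_filter, ih,
        foldl_expand_append insert_value target_value rest ([] ++ [n])]
      simp [List.filter_cons] <;> split_ifs <;> simp

-- ===== VERDICT (by name: the statement is the Claim_ definition above) =====
theorem insert_before_spec : Claim_equal_insert_before := by
  intro numbers insert_value target_value _
  unfold Spec_insert_before insert_before insert_before_alt
  rw [fold_invariant]
  simp
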